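-- pv_equiv track=rewrite | github.com/jcolinpatrick/kryptos | scripts/e_s_142_weltzeituhr_orrery.py | apply_columnar
-- ===== SOURCE A (Python) =====
-- import math
--
-- def apply_columnar(ct_text, width, col_order):
--     """Apply columnar transposition decryption.
--
--     ct_text written into grid row-by-row, read off in col_order.
--     Returns the permutation (gather convention).
--     """
--     n = len(ct_text)
--     nrows = math.ceil(n / width)
--     # Build column lengths (last row may be short)
--     full_cols = n % width if n % width != 0 else width
--     col_lengths = []
--     for c in range(width):
--         if c < (n % width) or n % width == 0:
--             col_lengths.append(nrows)
--         else:
--             col_lengths.append(nrows - 1)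
--
--     # CT was written column-by-column in col_order
--     # To decrypt: assign CT chars to columns in read order, then read row-by-row
--     perm = [0] * n
--     ct_pos = 0
--     col_contents = [[] for _ in range(width)]
--     for rank in range(width):
--         col_idx = col_order[rank]
--         clen = col_lengths[col_idx]
--         for row in range(clen):
--             col_contents[col_idx].append(ct_pos)
--             ct_pos += 1
--
--     # Now read row-by-row
--     result_perm = []
--     for row in range(nrows):
--         for col in range(width):
--             if row < len(col_contents[col]):
--                 result_perm.append(col_contents[col][row])
--
--     return result_perm
-- ===== SOURCE B (Python) =====
-- import math
--
-- def apply_columnar(ct_text, width, col_order):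
--     """Columnar transposition decryption permutation (gather convention).
--
--     Scatter-and-sort: each ciphertext position is emitted once as a pair
--     (destination row-major cell index, ct position); sorting by destination
--     yields the row-by-row read directly, with no per-column containment
--     structure and no second gather phase.
--     """
--     n = len(ct_text)
--     nrows = math.ceil(n / width)
--     r = n % width
--     pairs = []
--     ct_pos = 0
--     for rank in range(width):
--         col = col_order[rank]
--         clen = nrows if (col < r or r == 0) else nrows - 1
--         for row in range(clen):
--             pairs.append((row * width + col, ct_pos))
--             ct_pos += 1
--     pairs.sort(key=lambda p: p[0])
--     return [v for _, v in pairs]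
-- ===== Notes on version B (the rewrite author's own statement) =====
-- stated objective: alternative
-- what changed: Replaces A's gather (per-column lists of ct positions built by appending, then a nested row-by-row scan over all columns indexing into them) by a scatter-and-sort: each ct position is emitted once as a pair (row-major destination cell row*width+col computed arithmetically, ct position) and the pairs are sorted by destination, eliminating the per-column containment structure and the whole second gather phase.
-- outside the precondition, e.g. on apply_columnar('abcd', 2, [0, 0]): A returns [0, 1], B returns [0, 2, 1, 3]; on apply_columnar('abcd', 2, [-1, 0]): A returns [2, 0, 3, 1], B returns [0, 2, 1, 3]
import Mathlib
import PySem

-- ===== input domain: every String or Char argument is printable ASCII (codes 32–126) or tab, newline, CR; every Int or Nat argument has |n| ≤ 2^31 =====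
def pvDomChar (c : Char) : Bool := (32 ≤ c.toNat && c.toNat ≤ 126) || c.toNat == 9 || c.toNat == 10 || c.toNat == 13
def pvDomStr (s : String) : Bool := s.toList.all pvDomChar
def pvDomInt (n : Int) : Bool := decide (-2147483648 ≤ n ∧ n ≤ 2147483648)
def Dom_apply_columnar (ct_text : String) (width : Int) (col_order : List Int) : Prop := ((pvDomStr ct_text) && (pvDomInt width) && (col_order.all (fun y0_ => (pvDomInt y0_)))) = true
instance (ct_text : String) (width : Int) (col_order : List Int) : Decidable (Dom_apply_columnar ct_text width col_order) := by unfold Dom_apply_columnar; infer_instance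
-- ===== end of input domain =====

-- B replaces A's gather (per-column lists of ct positions read off row by row)
-- by a scatter-and-sort: each ct position is emitted once as a pair
-- (row-major destination cell row*width+col, ct position) and the pairs are
-- sorted by destination; objective: alternative.

-- ===== PORT A =====
def apply_columnar (ct_text : String) (width : Int) (col_order : List Int) : List Int :=
  let n : Int := PySem.Str.len ct_text
  let nrows : Int := -(PySem.Int.floordiv (-n) width)  -- math.ceil(n/width); exact on int args (width ≠ 0 under Pre_)
  let m : Int := PySem.Int.mod n width
  let col_lengths : List Int :=
    (PySem.List.pyRange 0 width 1).foldl
      (fun acc c => if c < m ∨ m = 0 then acc ++ [nrows] else acc ++ [nrows - 1]) []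
  let st : Int × List (List Int) :=
    (PySem.List.pyRange 0 width 1).foldl
      (fun (s : Int × List (List Int)) rank =>
        let col_idx := PySem.List.pyGetD col_order rank 0   -- in range under Pre_
        let clen := PySem.List.pyGetD col_lengths col_idx 0
        (PySem.List.pyRange 0 clen 1).foldl
          (fun (s2 : Int × List (List Int)) _row =>
            (s2.1 + 1,
             PySem.List.pySetD s2.2 col_idx (PySem.List.pyGetD s2.2 col_idx [] ++ [s2.1])))
          s)
      (0, List.replicate width.toNat ([] : List Int))
  let col_contents := st.2
  (PySem.List.pyRange 0 nrows 1).foldl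
    (fun acc row =>
      (PySem.List.pyRange 0 width 1).foldl
        (fun acc2 col =>
          if row < PySem.List.len (PySem.List.pyGetD col_contents col []) then
            acc2 ++ [PySem.List.pyGetD (PySem.List.pyGetD col_contents col []) row 0]
          else acc2)
        acc)
    []

-- ===== PORT B =====
def apply_columnar_alt (ct_text : String) (width : Int) (col_order : List Int) : List Int :=
  let n : Int := PySem.Str.len ct_text
  let nrows : Int := -(PySem.Int.floordiv (-n) width)  -- math.ceil(n / width); width ≠ 0 under Pre_
  let r : Int := PySem.Int.mod n width
  let st : List (Int × Int) × Int :=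
    (PySem.List.pyRange 0 width 1).foldl
      (fun (s : List (Int × Int) × Int) rank =>
        let col := PySem.List.pyGetD col_order rank 0   -- in range under Pre_
        let clen := if col < r ∨ r = 0 then nrows else nrows - 1
        (PySem.List.pyRange 0 clen 1).foldl
          (fun (s2 : List (Int × Int) × Int) row =>
            (s2.1 ++ [(row * width + col, s2.2)], s2.2 + 1))
          s)
      ([], 0)
  (PySem.List.sorted st.1 (fun p => p.1)).map (fun p => p.2)

-- ===== PRECONDITION & SPEC =====
-- Pre_ excludes: width = 0 (A raises ZeroDivisionError); width ≥ 1 with fewer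
-- than width entries in col_order or an entry outside [0, width) (IndexError,
-- except negative entries in [-width,0), where A's value rests on accidental
-- negative-index wraparound); and duplicate entries among the first width
-- entries, where A's append-twice/read-first behaviour on a malformed key is
-- accidental. width < 0 (A returns []) is kept inside Pre_.
def Pre_apply_columnar (ct_text : String) (width : Int) (col_order : List Int) : Prop :=
  width ≤ -1 ∨
  (1 ≤ width ∧ width ≤ (col_order.length : Int) ∧
    (col_order.take width.toNat).Nodup ∧
    ∀ c ∈ col_order.take width.toNat, 0 ≤ c ∧ c < width)
instance (ct_text : String) (width : Int) (col_order : List Int) : Decidable (Pre_apply_columnar ct_text width col_order) := by unfold Pre_apply_columnar; infer_instance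

def pvWitness_apply_columnar : String × Int × List Int := ("HELLOWORLD", 3, [2, 0, 1])

def Spec_apply_columnar (ct_text : String) (width : Int) (col_order : List Int) (out : List Int) : Prop := out = apply_columnar_alt ct_text width col_order
instance (ct_text : String) (width : Int) (col_order : List Int) (out : List Int) : Decidable (Spec_apply_columnar ct_text width col_order out) := by unfold Spec_apply_columnar; infer_instance

-- ===== CLAIM (what is proved, stated in full; the proofs are below) =====
def Claim_equal_apply_columnar : Prop := ∀ (ct_text : String) (width : Int) (col_order : List Int), Dom_apply_columnar ct_text width col_order → Pre_apply_columnar ct_text width col_order → Spec_apply_columnar ct_text width col_order (apply_columnar ct_text width col_order)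

-- ===== LEMMAS AND PROOFS =====

-- Proof-only named pieces, definitionally equal to the corresponding parts of
-- the two ports (used to state the bridging lemmas without giant let-terms).
def pvNrows (n ws : Int) : Int := -(PySem.Int.floordiv (-n) ws)

def pvLA (n ws : Int) : List Int :=
  (PySem.List.pyRange 0 ws 1).foldl
    (fun acc c => if c < PySem.Int.mod n ws ∨ PySem.Int.mod n ws = 0 then
        acc ++ [pvNrows n ws] else acc ++ [pvNrows n ws - 1]) []

def pvLB (n ws : Int) : List Int :=
  (PySem.List.pyRange 0 ws 1).map
    (fun c => if c < PySem.Int.mod n ws ∨ PySem.Int.mod n ws = 0 then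
        pvNrows n ws else pvNrows n ws - 1)

def pvFillA (L : List Int) (s : Int × List (List Int)) (c : Int) : Int × List (List Int) :=
  (PySem.List.pyRange 0 (PySem.List.pyGetD L c 0) 1).foldl
    (fun s2 _ => (s2.1 + 1, PySem.List.pySetD s2.2 c (PySem.List.pyGetD s2.2 c [] ++ [s2.1]))) s

def pvFillB (L : List Int) (s : List Int × Int) (c : Int) : List Int × Int :=
  (PySem.List.pySetD s.1 c s.2, s.2 + PySem.List.pyGetD L c 0)

def pvStA (n ws : Int) (co : List Int) : Int × List (List Int) :=
  (PySem.List.pyRange 0 ws 1).foldl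
    (fun s rank => pvFillA (pvLA n ws) s (PySem.List.pyGetD co rank 0))
    (0, List.replicate ws.toNat ([] : List Int))

def pvStB (n ws : Int) (co : List Int) : List Int × Int :=
  (PySem.List.pyRange 0 ws 1).foldl
    (fun s rank => pvFillB (pvLB n ws) s (PySem.List.pyGetD co rank 0))
    (List.replicate ws.toNat (0 : Int), 0)

def pvReadA (CC : List (List Int)) (ws nrows : Int) : List Int :=
  (PySem.List.pyRange 0 nrows 1).foldl
    (fun acc row =>
      (PySem.List.pyRange 0 ws 1).foldl
        (fun acc2 col =>
          if row < PySem.List.len (PySem.List.pyGetD CC col []) then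
            acc2 ++ [PySem.List.pyGetD (PySem.List.pyGetD CC col []) row 0]
          else acc2)
        acc)
    []

def pvReadB (L ST : List Int) (ws nrows : Int) : List Int :=
  (PySem.List.pyRange 0 nrows 1).flatMap (fun row =>
    (PySem.List.pyRange 0 ws 1).filterMap (fun c =>
      if row < PySem.List.pyGetD L c 0 then some (PySem.List.pyGetD ST c 0 + row) else none))

-- B-side ghost pieces: the pair-emitting column step and the scatter target.
def pvColStep (n ws : Int) (s : List (Int × Int) × Int) (col : Int) : List (Int × Int) × Int :=
  (PySem.List.pyRange 0
      (if col < PySem.Int.mod n ws ∨ PySem.Int.mod n ws = 0 then pvNrows n ws else pvNrows n ws - 1) 1).foldl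
    (fun s2 row => (s2.1 ++ [(row * ws + col, s2.2)], s2.2 + 1)) s

def pvSt (n ws : Int) (co : List Int) : List (Int × Int) × Int :=
  (PySem.List.pyRange 0 ws 1).foldl
    (fun s rank => pvColStep n ws s (PySem.List.pyGetD co rank 0)) ([], 0)

def pvPairStep (L : List Int) (ws : Int) (s : List (Int × Int) × Int) (c : Int) : List (Int × Int) × Int :=
  (PySem.List.pyRange 0 (L.getD c.toNat 0) 1).foldl
    (fun s2 row => (s2.1 ++ [(row * ws + c, s2.2)], s2.2 + 1)) s

def pvT (L ST : List Int) (ws nrows : Int) : List (Int × Int) :=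
  (PySem.List.pyRange 0 nrows 1).flatMap (fun row =>
    (PySem.List.pyRange 0 ws 1).filterMap (fun c =>
      if row < PySem.List.pyGetD L c 0 then some (row * ws + c, PySem.List.pyGetD ST c 0 + row) else none))

-- sign facts about Python's floor division used for nrows = ceil(n/width)
lemma pv_fdiv_sign1 (n ws : Int) (hn : 0 ≤ n) (hws : ws ≤ -1) : 0 ≤ (-n).fdiv ws := by
  have h0 := Int.mul_ediv_add_emod (-n) ws
  have h1 := Int.emod_nonneg (-n) (by omega : ws ≠ 0)
  rw [Int.fdiv_eq_ediv]
  rcases em (ws ∣ -n) with hd | hd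
  · rw [if_pos (Or.inr hd)]
    by_contra hq
    have hq' : -n / ws ≤ -1 := by omega
    have := mul_le_mul_of_nonpos_left hq' (by omega : ws ≤ 0)
    omega
  · rw [if_neg (by rintro (h | h) <;> [omega; exact hd h])]
    have hrne : -n % ws ≠ 0 := fun h => hd (Int.dvd_of_emod_eq_zero h)
    by_contra hq
    have hq' : -n / ws ≤ 0 := by omega
    have h3 := mul_le_mul_of_nonpos_left hq' (by omega : ws ≤ 0)
    rw [mul_zero] at h3
    omega

lemma pv_fdiv_sign2 (n ws : Int) (hn : 0 ≤ n) (hws : 1 ≤ ws) : (-n).fdiv ws ≤ 0 := by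
  have h0 := Int.mul_ediv_add_emod (-n) ws
  have h1 := Int.emod_nonneg (-n) (by omega : ws ≠ 0)
  rw [Int.fdiv_eq_ediv, if_pos (Or.inl (by omega))]
  by_contra hq
  have hq' : 1 ≤ -n / ws := by omega
  have := mul_le_mul_of_nonneg_left hq' (by omega : (0:Int) ≤ ws)
  omega

lemma pv_fdiv_sign3 (n ws : Int) (hn : 0 ≤ n) (hws : 1 ≤ ws)
    (hm : PySem.Int.mod n ws ≠ 0) : (-n).fdiv ws ≤ -1 := by
  have h0 := Int.mul_ediv_add_emod (-n) ws
  have h1 := Int.emod_nonneg (-n) (by omega : ws ≠ 0)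
  have hn1 : 1 ≤ n := by
    rcases em (n = 0) with rfl | hne
    · exfalso; exact hm (by simp [PySem.Int.mod])
    · omega
  rw [Int.fdiv_eq_ediv, if_pos (Or.inl (by omega))]
  by_contra hq
  have hq' : 0 ≤ -n / ws := by omega
  have := mul_nonneg (by omega : (0:Int) ≤ ws) hq'
  omega

lemma pv_filterMap_ite {a b : Type} (p : a → Prop) [DecidablePred p] (f : a → b) (l : List a) :
    l.filterMap (fun x => if p x then some (f x) else none)
      = (l.filter (fun x => decide (p x))).map f := by
  induction l with
  | nil => rfl
  | cons x t ih =>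
    by_cases h : p x <;> simp [h, ih]

lemma pv_innerA (c : Int) (hc0 : 0 ≤ c) :
    ∀ (l : List Int) (p : Int) (cs : List (List Int)), c.toNat < cs.length →
    l.foldl (fun (s2 : Int × List (List Int)) _ =>
        (s2.1 + 1, PySem.List.pySetD s2.2 c (PySem.List.pyGetD s2.2 c [] ++ [s2.1]))) (p, cs)
      = (p + l.length,
         cs.set c.toNat (cs.getD c.toNat [] ++ PySem.List.pyRange p (p + l.length) 1)) := by
  intro l
  induction l with
  | nil =>
    intro p cs hlen
    simp only [List.foldl_nil, List.length_nil, Nat.cast_zero, add_zero]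
    rw [PySem.List.pyRange_one_eq_nil (le_refl p), List.append_nil,
        List.getD_eq_getElem cs [] hlen, List.set_getElem_self]
  | cons x t ih =>
    intro p cs hlen
    have hci : c < (cs.length : Int) := by omega
    have hstep : PySem.List.pySetD cs c (PySem.List.pyGetD cs c [] ++ [p])
        = cs.set c.toNat (cs[c.toNat] ++ [p]) := by
      rw [PySem.List.pyGetD_eq_getElem cs [] hc0 hci, PySem.List.pySetD_of_nonneg cs _ hc0]
    rw [List.foldl_cons, hstep, ih (p + 1) _ (by simpa using hlen)]
    have hidx : (cs.set c.toNat (cs[c.toNat] ++ [p])).getD c.toNat []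
        = cs[c.toNat] ++ [p] := by
      rw [List.getD_eq_getElem _ [] (by simpa using hlen), List.getElem_set_self]
    rw [hidx, List.set_set]
    have hlen' : (p + (1 : Int)) + (t.length : Int) = p + ((x :: t).length : Int) := by
      simp only [List.length_cons]
      push_cast
      ring
    rw [hlen']
    have hrange : PySem.List.pyRange p (p + ((x :: t).length : Int)) 1
        = p :: PySem.List.pyRange (p + 1) (p + ((x :: t).length : Int)) 1 := by
      refine PySem.List.pyRange_one_cons ?_
      simp only [List.length_cons]
      push_cast
      omega
    rw [hrange, List.getD_eq_getElem cs [] hlen]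
    simp [List.append_assoc]

lemma pv_cover (W : Nat) (cols : List Int) (hnd : cols.Nodup)
    (hlen : cols.length = W) (hin : ∀ c ∈ cols, 0 ≤ c ∧ c < (W : Int)) :
    ∀ j : Nat, j < W → (j : Int) ∈ cols := by
  intro j hj
  have hmap : (cols.map Int.toNat).Nodup := by
    refine hnd.map_on ?_
    intro x hx y hy hxy
    have hx' := hin x hx; have hy' := hin y hy; omega
  have hsub : (cols.map Int.toNat).toFinset ⊆ Finset.range W := by
    intro a ha
    simp only [List.mem_toFinset, List.mem_map] at ha
    obtain ⟨c, hc, rfl⟩ := ha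
    have := hin c hc
    simp only [Finset.mem_range]; omega
  have hcard : W ≤ (cols.map Int.toNat).toFinset.card := by
    rw [List.toFinset_card_of_nodup hmap]; simp [hlen]
  have heq := Finset.eq_of_subset_of_card_le hsub (by simpa using hcard)
  have hjmem : j ∈ (cols.map Int.toNat).toFinset := by
    rw [heq]; simp [hj]
  simp only [List.mem_toFinset, List.mem_map] at hjmem
  obtain ⟨c, hc, hcj⟩ := hjmem
  have := hin c hc
  have hcjj : c = (j : Int) := by omega
  rwa [← hcjj]

lemma pv_fill (L : List Int) (W : Nat) (hL : L.length = W) (hLpos : ∀ x ∈ L, 0 ≤ x) :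
    ∀ (cols : List Int) (p : Int) (cs : List (List Int)) (st : List Int),
    cs.length = W → st.length = W → cols.Nodup →
    (∀ c ∈ cols, 0 ≤ c ∧ c < (W : Int)) →
    (∀ c ∈ cols, cs.getD c.toNat [] = []) →
    (cols.foldl (pvFillA L) (p, cs)).1 = (cols.foldl (pvFillB L) (st, p)).2 ∧
    (cols.foldl (pvFillA L) (p, cs)).2.length = W ∧
    (cols.foldl (pvFillB L) (st, p)).1.length = W ∧
    (∀ c ∈ cols,
      (cols.foldl (pvFillA L) (p, cs)).2.getD c.toNat []
        = PySem.List.pyRange ((cols.foldl (pvFillB L) (st, p)).1.getD c.toNat 0)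
            (((cols.foldl (pvFillB L) (st, p)).1.getD c.toNat 0) + L.getD c.toNat 0) 1) ∧
    (∀ j : Nat, j < W → (∀ c ∈ cols, c.toNat ≠ j) →
      (cols.foldl (pvFillA L) (p, cs)).2.getD j [] = cs.getD j []
      ∧ (cols.foldl (pvFillB L) (st, p)).1.getD j 0 = st.getD j 0) := by
  intro cols
  induction cols with
  | nil =>
    intro p cs st hcs hst _ _ _
    exact ⟨rfl, hcs, hst, by simp, by intro j hj _; exact ⟨rfl, rfl⟩⟩
  | cons c t ih =>
    intro p cs st hcs hst hnd hin hemp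
    obtain ⟨hc0, hcW⟩ := hin c (by simp)
    have hk : c.toNat < W := by omega
    have hLk0 : 0 ≤ L.getD c.toNat 0 := by
      have hmem : L.getD c.toNat 0 ∈ L := by
        rw [List.getD_eq_getElem L 0 (by omega)]
        exact List.getElem_mem _
      exact hLpos _ hmem
    have hgL : PySem.List.pyGetD L c 0 = L.getD c.toNat 0 := by
      rw [PySem.List.pyGetD_eq_getElem L 0 hc0 (by rw [hL]; omega),
          List.getD_eq_getElem L 0 (by omega)]
    have hstepA : pvFillA L (p, cs) c
        = (p + L.getD c.toNat 0,
           cs.set c.toNat (PySem.List.pyRange p (p + L.getD c.toNat 0) 1)) := by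
      unfold pvFillA
      rw [hgL, pv_innerA c hc0 _ p cs (by omega)]
      have hlen : ((PySem.List.pyRange 0 (L.getD c.toNat 0) 1).length : Int)
          = L.getD c.toNat 0 := by
        rw [PySem.List.length_pyRange_one]; omega
      rw [hlen, hemp c (by simp), List.nil_append]
    have hstepB : pvFillB L (st, p) c = (st.set c.toNat p, p + L.getD c.toNat 0) := by
      unfold pvFillB
      rw [hgL, PySem.List.pySetD_of_nonneg st p hc0]
    have hnd' : t.Nodup := (List.nodup_cons.mp hnd).2
    have hcnt : c ∉ t := (List.nodup_cons.mp hnd).1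
    have hin' : ∀ c' ∈ t, 0 ≤ c' ∧ c' < (W : Int) := fun c' hc' => hin c' (by simp [hc'])
    have hne : ∀ c' ∈ t, c'.toNat ≠ c.toNat := by
      intro c' hc' h
      obtain ⟨h0, _⟩ := hin' c' hc'
      have hcc : c' = c := by omega
      exact hcnt (hcc ▸ hc')
    have hemp' : ∀ c' ∈ t,
        (cs.set c.toNat (PySem.List.pyRange p (p + L.getD c.toNat 0) 1)).getD c'.toNat [] = [] := by
      intro c' hc'
      obtain ⟨h0, hW'⟩ := hin' c' hc'
      rw [List.getD_eq_getElem _ [] (by rw [List.length_set]; omega),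
          List.getElem_set_ne (Ne.symm (hne c' hc')),
          ← List.getD_eq_getElem cs [] (by omega)]
      exact hemp c' (by simp [hc'])
    have IH := ih (p + L.getD c.toNat 0)
      (cs.set c.toNat (PySem.List.pyRange p (p + L.getD c.toNat 0) 1))
      (st.set c.toNat p) (by rw [List.length_set]; exact hcs)
      (by rw [List.length_set]; exact hst) hnd' hin' hemp'
    obtain ⟨ih1, ih2, ih3, ih4, ih5⟩ := IH
    rw [List.foldl_cons, List.foldl_cons, hstepA, hstepB]
    refine ⟨ih1, ih2, ih3, ?_, ?_⟩
    · intro c' hc'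
      rcases List.mem_cons.mp hc' with rfl | hmem
      · obtain ⟨hA, hB⟩ := ih5 c'.toNat hk (fun c'' hc'' => hne c'' hc'')
        rw [hA, hB]
        have e1 : (cs.set c'.toNat (PySem.List.pyRange p (p + L.getD c'.toNat 0) 1)).getD
            c'.toNat [] = PySem.List.pyRange p (p + L.getD c'.toNat 0) 1 := by
          rw [List.getD_eq_getElem _ [] (by rw [List.length_set]; omega)]
          exact List.getElem_set_self _
        have e2 : (st.set c'.toNat p).getD c'.toNat 0 = p := by
          rw [List.getD_eq_getElem _ 0 (by rw [List.length_set]; omega)]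
          exact List.getElem_set_self _
        rw [e1, e2]
      · exact ih4 c' hmem
    · intro j hj hnotin
      have hcj : c.toNat ≠ j := hnotin c (by simp)
      obtain ⟨hA, hB⟩ := ih5 j hj (fun c'' hc'' => hnotin c'' (by simp [hc'']))
      constructor
      · rw [hA, List.getD_eq_getElem _ [] (by rw [List.length_set]; omega),
            List.getElem_set_ne hcj, ← List.getD_eq_getElem cs [] (by omega)]
      · rw [hB, List.getD_eq_getElem _ 0 (by rw [List.length_set]; omega),
            List.getElem_set_ne hcj, ← List.getD_eq_getElem st 0 (by omega)]

lemma pv_read (L ST : List Int) (CC : List (List Int)) (ws nrows : Int) (W : Nat)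
    (hWs : (W : Int) = ws)
    (hClen : CC.length = W) (hSlen : ST.length = W) (hLlen : L.length = W)
    (hLpos : ∀ x ∈ L, 0 ≤ x)
    (hmain : ∀ k : Nat, k < W →
      CC.getD k [] = PySem.List.pyRange (ST.getD k 0) (ST.getD k 0 + L.getD k 0) 1) :
    pvReadA CC ws nrows = pvReadB L ST ws nrows := by
  unfold pvReadA pvReadB
  rw [PySem.List.foldl_congr_mem _ _
      (fun acc row => acc ++
        ((PySem.List.pyRange 0 ws 1).filter
            (fun col => decide (row < PySem.List.len (PySem.List.pyGetD CC col [])))).map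
          (fun col => PySem.List.pyGetD (PySem.List.pyGetD CC col []) row 0)) _
      (by intro acc row _; exact PySem.List.foldl_append_ite _ _ _ _),
    PySem.List.foldl_append_eq_flatMap, List.nil_append]
  refine List.flatMap_congr ?_
  intro row hrow
  have hrow0 : 0 ≤ row := (PySem.List.mem_pyRange_one.mp hrow).1
  rw [pv_filterMap_ite (fun c => row < PySem.List.pyGetD L c 0)
      (fun c => PySem.List.pyGetD ST c 0 + row)]
  have hfacts : ∀ col ∈ PySem.List.pyRange 0 ws 1,
      PySem.List.pyGetD CC col []
        = PySem.List.pyRange (ST.getD col.toNat 0)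
            (ST.getD col.toNat 0 + L.getD col.toNat 0) 1
      ∧ PySem.List.pyGetD L col 0 = L.getD col.toNat 0
      ∧ PySem.List.pyGetD ST col 0 = ST.getD col.toNat 0
      ∧ 0 ≤ L.getD col.toNat 0 := by
    intro col hcol
    obtain ⟨h0, hw⟩ := PySem.List.mem_pyRange_one.mp hcol
    have hkW : col.toNat < W := by omega
    refine ⟨?_, ?_, ?_, ?_⟩
    · rw [PySem.List.pyGetD_eq_getElem CC [] h0 (by rw [hClen]; omega),
          ← List.getD_eq_getElem CC [] (by omega)]
      exact hmain col.toNat hkW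
    · rw [PySem.List.pyGetD_eq_getElem L 0 h0 (by rw [hLlen]; omega),
          List.getD_eq_getElem L 0 (by omega)]
    · rw [PySem.List.pyGetD_eq_getElem ST 0 h0 (by rw [hSlen]; omega),
          List.getD_eq_getElem ST 0 (by omega)]
    · have hmem : L.getD col.toNat 0 ∈ L := by
        rw [List.getD_eq_getElem L 0 (by omega)]
        exact List.getElem_mem _
      exact hLpos _ hmem
  rw [List.filter_congr (l := PySem.List.pyRange 0 ws 1)
      (q := fun col => decide (row < PySem.List.pyGetD L col 0)) ?_]
  · refine List.map_congr_left ?_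
    intro col hcolf
    have hcol : col ∈ PySem.List.pyRange 0 ws 1 := List.mem_of_mem_filter hcolf
    obtain ⟨ecc, eL, eS, hLk0⟩ := hfacts col hcol
    have hcond : row < L.getD col.toNat 0 := by
      have h := List.of_mem_filter hcolf
      simpa [eL] using h
    simp only [ecc, eS]
    rw [PySem.List.pyGetD_eq_getElem _ 0 hrow0
        (by rw [PySem.List.length_pyRange_one]; omega)]
    rw [PySem.List.getElem_pyRange_one _ _ _
        (by rw [PySem.List.length_pyRange_one]; omega)]
    omega
  · intro col hcol
    obtain ⟨ecc, eL, _, hLk0⟩ := hfacts col hcol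
    simp only [ecc, eL, PySem.List.len_eq, PySem.List.length_pyRange_one,
      decide_eq_decide]
    omega

lemma pv_main (n ws : Int) (co : List Int) (hn : 0 ≤ n) (h1 : 1 ≤ ws)
    (h2 : ws ≤ (co.length : Int)) (hnd : (co.take ws.toNat).Nodup)
    (hin : ∀ c ∈ co.take ws.toNat, 0 ≤ c ∧ c < ws) :
    pvReadA (pvStA n ws co).2 ws (pvNrows n ws)
      = pvReadB (pvLB n ws) (pvStB n ws co).1 ws (pvNrows n ws) := by
  have hWs : (ws.toNat : Int) = ws := by omega
  have hLeq : pvLA n ws = pvLB n ws := by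
    unfold pvLA pvLB
    rw [PySem.List.foldl_congr_mem (PySem.List.pyRange 0 ws 1) _
        (fun acc c => acc ++
          [if c < PySem.Int.mod n ws ∨ PySem.Int.mod n ws = 0 then
              pvNrows n ws else pvNrows n ws - 1]) []
        (by
          intro acc x _
          by_cases h : x < PySem.Int.mod n ws ∨ PySem.Int.mod n ws = 0 <;> simp [h]),
      PySem.List.foldl_append_singleton_eq_map, List.nil_append]
  have hq2 := pv_fdiv_sign2 n ws hn h1
  have hnr0 : 0 ≤ pvNrows n ws := by unfold pvNrows PySem.Int.floordiv; omega
  have hnr1 : PySem.Int.mod n ws ≠ 0 → 1 ≤ pvNrows n ws := by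
    intro hm
    have := pv_fdiv_sign3 n ws hn h1 hm
    unfold pvNrows PySem.Int.floordiv
    omega
  have hLlen : (pvLB n ws).length = ws.toNat := by
    unfold pvLB
    rw [List.length_map, PySem.List.length_pyRange_one]
    omega
  have hLpos : ∀ x ∈ pvLB n ws, 0 ≤ x := by
    intro x hx
    unfold pvLB at hx
    simp only [List.mem_map] at hx
    obtain ⟨c, hc, rfl⟩ := hx
    split_ifs with h
    · exact hnr0
    · have hm : PySem.Int.mod n ws ≠ 0 := by tauto
      have := hnr1 hm
      omega
  have hcols : (PySem.List.pyRange 0 ws 1).map (fun r => PySem.List.pyGetD co r 0)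
      = co.take ws.toNat := by
    apply List.ext_getElem
    · rw [List.length_map, PySem.List.length_pyRange_one, List.length_take]
      omega
    · intro k hk1 hk2
      have hkws : k < ws.toNat := by
        rw [List.length_map, PySem.List.length_pyRange_one] at hk1
        omega
      have hkco : k < co.length := by omega
      rw [List.getElem_map, PySem.List.getElem_pyRange_one _ _ _
            (by rw [PySem.List.length_pyRange_one]; omega),
          List.getElem_take,
          show (0 : Int) + (k : Int) = ((k : Nat) : Int) from by omega,
          PySem.List.pyGetD_natCast, List.getD_eq_getElem co 0 hkco]
  have hfoldA : pvStA n ws co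
      = (co.take ws.toNat).foldl (pvFillA (pvLB n ws)) (0, List.replicate ws.toNat []) := by
    unfold pvStA
    rw [hLeq, ← hcols, List.foldl_map]
  have hfoldB : pvStB n ws co
      = (co.take ws.toNat).foldl (pvFillB (pvLB n ws)) (List.replicate ws.toNat 0, 0) := by
    unfold pvStB
    rw [← hcols, List.foldl_map]
  have hinW : ∀ c ∈ co.take ws.toNat, 0 ≤ c ∧ c < ((ws.toNat : Nat) : Int) := by
    intro c hc
    have := hin c hc
    omega
  have hempinit : ∀ c ∈ co.take ws.toNat,
      (List.replicate ws.toNat ([] : List Int)).getD c.toNat [] = [] := by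
    intro c hc
    by_cases hj : c.toNat < ws.toNat
    · rw [List.getD_replicate _ hj]
    · rw [List.getD_eq_default _ _ (by rw [List.length_replicate]; omega)]
  have hfill := pv_fill (pvLB n ws) ws.toNat hLlen hLpos (co.take ws.toNat) 0
      (List.replicate ws.toNat []) (List.replicate ws.toNat 0)
      (List.length_replicate) (List.length_replicate) hnd hinW hempinit
  obtain ⟨_, hAlen, hBlen, hMainC, _⟩ := hfill
  have hcovlen : (co.take ws.toNat).length = ws.toNat := by
    rw [List.length_take]; omega
  have hcov := pv_cover ws.toNat (co.take ws.toNat) hnd hcovlen hinW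
  rw [hfoldA, hfoldB]
  refine pv_read _ _ _ ws (pvNrows n ws) ws.toNat hWs hAlen ?_ hLlen hLpos ?_
  · exact hBlen
  · intro k hk
    have hmem := hcov k hk
    have := hMainC (k : Int) hmem
    simpa using this

-- the ws ≤ -1 corner: A reads zero rows, B emits zero pairs
lemma pv_negA (n ws : Int) (co : List Int) (hn : 0 ≤ n) (hws : ws ≤ -1) :
    pvReadA (pvStA n ws co).2 ws (pvNrows n ws) = [] := by
  have hq := pv_fdiv_sign1 n ws hn hws
  have hr : PySem.List.pyRange 0 (pvNrows n ws) 1 = [] := by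
    refine PySem.List.pyRange_one_eq_nil ?_
    unfold pvNrows PySem.Int.floordiv
    omega
  unfold pvReadA
  rw [hr]
  rfl

lemma pv_negB (n ws : Int) (co : List Int) (hws : ws ≤ -1) :
    (PySem.List.sorted (pvSt n ws co).1 (fun p => p.1)).map (fun p => p.2) = [] := by
  have h0 : PySem.List.pyRange 0 ws 1 = [] :=
    PySem.List.pyRange_one_eq_nil (by omega)
  unfold pvSt
  rw [h0]
  rfl

-- the inner pair-emitting loop of B, in closed form
lemma pv_innerB (ws c : Int) :
    ∀ (k : Nat) (a p : Int) (acc : List (Int × Int)),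
    (PySem.List.pyRange a (a + (k : Int)) 1).foldl
        (fun s2 row => (s2.1 ++ [(row * ws + c, s2.2)], s2.2 + 1)) (acc, p)
      = (acc ++ (PySem.List.pyRange a (a + (k : Int)) 1).map
            (fun row => (row * ws + c, p + (row - a))), p + (k : Int)) := by
  intro k
  induction k with
  | zero =>
    intro a p acc
    rw [PySem.List.pyRange_one_eq_nil (by push_cast; omega)]
    simp
  | succ m ih =>
    intro a p acc
    have hcons : PySem.List.pyRange a (a + ((m + 1 : Nat) : Int)) 1
        = a :: PySem.List.pyRange (a + 1) (a + ((m + 1 : Nat) : Int)) 1 :=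
      PySem.List.pyRange_one_cons (by push_cast; omega)
    rw [hcons]
    simp only [List.foldl_cons, List.map_cons]
    rw [show a + ((m + 1 : Nat) : Int) = (a + 1) + ((m : Nat) : Int) from by push_cast; ring]
    rw [ih (a + 1) (p + 1) (acc ++ [(a * ws + c, p)])]
    rw [Prod.mk.injEq]
    constructor
    · rw [show (fun row : Int => (row * ws + c, p + 1 + (row - (a + 1))))
            = (fun row : Int => (row * ws + c, p + (row - a))) from by
          funext row
          rw [show p + 1 + (row - (a + 1)) = p + (row - a) from by ring],
        show p + (a - a) = p from by ring]
      simp [List.append_assoc]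
    · push_cast
      ring

-- the offset fold leaves untouched slots unchanged
lemma pv_stB (L : List Int) :
    ∀ (cols : List Int) (st : List Int) (p : Int) (j : Nat),
    (∀ c ∈ cols, 0 ≤ c) → (∀ c ∈ cols, c.toNat ≠ j) →
    (cols.foldl (pvFillB L) (st, p)).1.getD j 0 = st.getD j 0 := by
  intro cols
  induction cols with
  | nil => intro st p j _ _; rfl
  | cons c t ih =>
    intro st p j hpos hne
    have hc0 : 0 ≤ c := hpos c (by simp)
    rw [List.foldl_cons]
    have hinit : pvFillB L (st, p) c = (st.set c.toNat p, p + PySem.List.pyGetD L c 0) := by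
      unfold pvFillB
      rw [PySem.List.pySetD_of_nonneg st p hc0]
    rw [hinit]
    rw [ih _ _ _ (fun c' h => hpos c' (by simp [h])) (fun c' h => hne c' (by simp [h]))]
    rw [List.getD_eq_getElem?_getD, List.getD_eq_getElem?_getD,
        List.getElem?_set_ne (hne c (by simp))]

lemma pv_stB_len (L : List Int) :
    ∀ (cols : List Int) (st : List Int) (p : Int),
    (∀ c ∈ cols, 0 ≤ c) → (cols.foldl (pvFillB L) (st, p)).1.length = st.length := by
  intro cols
  induction cols with
  | nil => intro st p _; rfl
  | cons c t ih =>
    intro st p hpos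
    rw [List.foldl_cons]
    have hinit : pvFillB L (st, p) c = (st.set c.toNat p, p + PySem.List.pyGetD L c 0) := by
      unfold pvFillB
      rw [PySem.List.pySetD_of_nonneg st p (hpos c (by simp))]
    rw [hinit]
    rw [ih _ _ (fun c' h => hpos c' (by simp [h])), List.length_set]

-- B's pair fold, written as a flatMap of per-column blocks whose offsets are
-- the final values of the (ghost) offset fold
lemma pv_pairsFold (L : List Int) (W : Nat) (ws : Int) (hL : L.length = W)
    (hLpos : ∀ x ∈ L, 0 ≤ x) :
    ∀ (cols : List Int) (p : Int) (acc : List (Int × Int)) (st : List Int),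
    st.length = W → cols.Nodup → (∀ c ∈ cols, 0 ≤ c ∧ c < (W : Int)) →
    (cols.foldl (pvPairStep L ws) (acc, p)).1
      = acc ++ cols.flatMap (fun c =>
          (PySem.List.pyRange 0 (L.getD c.toNat 0) 1).map
            (fun row => (row * ws + c,
              (cols.foldl (pvFillB L) (st, p)).1.getD c.toNat 0 + row))) := by
  intro cols
  induction cols with
  | nil => intro p acc st _ _ _; simp
  | cons c t ih =>
    intro p acc st hst hnd hin
    obtain ⟨hc0, hcW⟩ := hin c (by simp)
    have hk : c.toNat < W := by omega
    have hLc0 : 0 ≤ L.getD c.toNat 0 :=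
      hLpos _ (by rw [List.getD_eq_getElem L 0 (by omega)]; exact List.getElem_mem _)
    have hgL : PySem.List.pyGetD L c 0 = L.getD c.toNat 0 := by
      rw [PySem.List.pyGetD_eq_getElem L 0 hc0 (by rw [hL]; omega),
          List.getD_eq_getElem L 0 (by omega)]
    have hstep : pvPairStep L ws (acc, p) c
        = (acc ++ (PySem.List.pyRange 0 (L.getD c.toNat 0) 1).map
              (fun row => (row * ws + c, p + row)), p + L.getD c.toNat 0) := by
      unfold pvPairStep
      have h0' : ((L.getD c.toNat 0).toNat : Int) = L.getD c.toNat 0 := by omega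
      have h1 := pv_innerB ws c (L.getD c.toNat 0).toNat 0 p acc
      rw [h0'] at h1
      simp only [zero_add, sub_zero] at h1
      exact h1
    have hstepB : pvFillB L (st, p) c = (st.set c.toNat p, p + L.getD c.toNat 0) := by
      unfold pvFillB
      rw [hgL, PySem.List.pySetD_of_nonneg st p hc0]
    have hnd' : t.Nodup := (List.nodup_cons.mp hnd).2
    have hcnt : c ∉ t := (List.nodup_cons.mp hnd).1
    have hin' : ∀ c' ∈ t, 0 ≤ c' ∧ c' < (W : Int) := fun c' h => hin c' (by simp [h])
    simp only [List.foldl_cons, hstep, hstepB, List.flatMap_cons]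
    rw [ih (p + L.getD c.toNat 0)
        (acc ++ (PySem.List.pyRange 0 (L.getD c.toNat 0) 1).map
          (fun row => (row * ws + c, p + row)))
        (st.set c.toNat p) (by rw [List.length_set]; exact hst) hnd' hin']
    have hstab : (t.foldl (pvFillB L) (st.set c.toNat p, p + L.getD c.toNat 0)).1.getD c.toNat 0
        = p := by
      rw [pv_stB L t _ _ c.toNat (fun c' h => (hin' c' h).1)
          (fun c' h => by
            have hb := hin' c' h
            have : c' ≠ c := fun e => hcnt (e ▸ h)
            omega)]
      rw [List.getD_eq_getElem _ 0 (by rw [List.length_set]; omega), List.getElem_set_self]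
    rw [hstab, List.append_assoc]

-- destination cells determine (row, col)
lemma pv_cell_inj (ws row c row' c' : Int) (hc : 0 ≤ c) (hc2 : c < ws)
    (hc' : 0 ≤ c') (hc2' : c' < ws)
    (he : row * ws + c = row' * ws + c') : row = row' ∧ c = c' := by
  have hws : 0 < ws := by omega
  have h1 : (c + ws * row) % ws = c := by
    rw [Int.add_mul_emod_self_left]; exact Int.emod_eq_of_lt hc hc2
  have h2 : (c' + ws * row') % ws = c' := by
    rw [Int.add_mul_emod_self_left]; exact Int.emod_eq_of_lt hc' hc2'
  have hcc : c = c' := by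
    rw [← h1, ← h2, show c + ws * row = row * ws + c from by ring,
        show c' + ws * row' = row' * ws + c' from by ring, he]
  refine ⟨?_, hcc⟩
  have hmul : row * ws = row' * ws := by omega
  exact mul_right_cancel₀ (by omega : ws ≠ 0) hmul

-- the emitted pair list has no duplicates (snd components are injective per
-- column; distinct columns give disjoint destination residues)
lemma pv_P_nodup (ws : Int) (L ST : List Int) (cols : List Int)
    (hnd : cols.Nodup) (hin : ∀ c ∈ cols, 0 ≤ c ∧ c < ws) :
    (cols.flatMap (fun c => (PySem.List.pyRange 0 (L.getD c.toNat 0) 1).map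
        (fun row => (row * ws + c, ST.getD c.toNat 0 + row)))).Nodup := by
  rw [List.nodup_flatMap]
  constructor
  · intro c _
    refine List.Nodup.map ?_ (PySem.List.nodup_pyRange_one 0 _)
    intro x y hxy
    have h := congrArg Prod.snd hxy
    simp only [] at h
    omega
  · refine List.Pairwise.imp_of_mem ?_ hnd
    intro a b ha hb hne x hx hx'
    simp only [List.mem_map] at hx hx'
    obtain ⟨row, hrow, rfl⟩ := hx
    obtain ⟨row', hrow', he⟩ := hx'
    obtain ⟨ha0, haw⟩ := hin a ha
    obtain ⟨hb0, hbw⟩ := hin b hb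
    have hfst := congrArg Prod.fst he
    simp only [] at hfst
    exact hne ((pv_cell_inj ws row' b row a hb0 hbw ha0 haw hfst).2).symm

-- the scatter target is strictly increasing in the destination component
lemma pv_T_pairwise (L ST : List Int) (ws nrows : Int) (hws : 1 ≤ ws) :
    (pvT L ST ws nrows).Pairwise (fun a b => a.1 < b.1) := by
  unfold pvT
  rw [List.pairwise_flatMap]
  constructor
  · intro row _
    rw [pv_filterMap_ite (fun c => row < PySem.List.pyGetD L c 0)
        (fun c => (row * ws + c, PySem.List.pyGetD ST c 0 + row))]
    rw [List.pairwise_map]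
    have hp : ((PySem.List.pyRange 0 ws 1).filter
        (fun c => decide (row < PySem.List.pyGetD L c 0))).Pairwise (· < ·) :=
      List.Pairwise.sublist List.filter_sublist (PySem.List.pairwise_lt_pyRange_one 0 ws)
    exact hp.imp (fun h => by omega)
  · refine List.Pairwise.imp_of_mem ?_ (PySem.List.pairwise_lt_pyRange_one 0 nrows)
    intro row row' hr hr' hlt x hx y hy
    simp only [List.mem_filterMap] at hx hy
    obtain ⟨c, hc, hcx⟩ := hx
    obtain ⟨c', hc', hcy⟩ := hy
    obtain ⟨hc0, hcws⟩ := PySem.List.mem_pyRange_one.mp hc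
    obtain ⟨hc0', hcws'⟩ := PySem.List.mem_pyRange_one.mp hc'
    have hx1 : x.1 = row * ws + c := by
      split at hcx
      · cases hcx; rfl
      · cases hcx
    have hy1 : y.1 = row' * ws + c' := by
      split at hcy
      · cases hcy; rfl
      · cases hcy
    rw [hx1, hy1]
    have hm := mul_le_mul_of_nonneg_right (show row + 1 ≤ row' from by omega)
      (show (0 : Int) ≤ ws from by omega)
    have he : (row + 1) * ws = row * ws + ws := by ring
    linarith

-- equivalence on the main domain: B's sorted scatter pairs ARE the row-major
-- read of the offset table
lemma pv_mainB (n ws : Int) (co : List Int) (hn : 0 ≤ n) (h1 : 1 ≤ ws)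
    (h2 : ws ≤ (co.length : Int)) (hnd : (co.take ws.toNat).Nodup)
    (hin : ∀ c ∈ co.take ws.toNat, 0 ≤ c ∧ c < ws) :
    (PySem.List.sorted (pvSt n ws co).1 (fun p => p.1)).map (fun p => p.2)
      = pvReadB (pvLB n ws) (pvStB n ws co).1 ws (pvNrows n ws) := by
  have hq2 := pv_fdiv_sign2 n ws hn h1
  have hnr0 : 0 ≤ pvNrows n ws := by unfold pvNrows PySem.Int.floordiv; omega
  have hnr1 : PySem.Int.mod n ws ≠ 0 → 1 ≤ pvNrows n ws := by
    intro hm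
    have := pv_fdiv_sign3 n ws hn h1 hm
    unfold pvNrows PySem.Int.floordiv
    omega
  have hLlen : (pvLB n ws).length = ws.toNat := by
    unfold pvLB
    rw [List.length_map, PySem.List.length_pyRange_one]
    omega
  have hLgetN : ∀ k : Nat, k < ws.toNat →
      (pvLB n ws).getD k 0 = (if (k : Int) < PySem.Int.mod n ws ∨ PySem.Int.mod n ws = 0 then
        pvNrows n ws else pvNrows n ws - 1) := by
    intro k hk
    rw [List.getD_eq_getElem _ 0 (by rw [hLlen]; omega)]
    unfold pvLB
    rw [List.getElem_map,
        PySem.List.getElem_pyRange_one _ _ _ (by rw [PySem.List.length_pyRange_one]; omega),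
        show (0 : Int) + (k : Int) = (k : Int) from by omega]
  have hLget : ∀ c : Int, 0 ≤ c → c < ws →
      (pvLB n ws).getD c.toNat 0
        = (if c < PySem.Int.mod n ws ∨ PySem.Int.mod n ws = 0 then
            pvNrows n ws else pvNrows n ws - 1) := by
    intro c h0 hw
    have := hLgetN c.toNat (by omega)
    rwa [show ((c.toNat : Nat) : Int) = c from by omega] at this
  have hLpos : ∀ x ∈ pvLB n ws, 0 ≤ x := by
    intro x hx
    unfold pvLB at hx
    simp only [List.mem_map] at hx
    obtain ⟨c, hc, rfl⟩ := hx
    split_ifs with h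
    · exact hnr0
    · have hm : PySem.Int.mod n ws ≠ 0 := by tauto
      have := hnr1 hm
      omega
  have hLle : ∀ k : Nat, k < ws.toNat → (pvLB n ws).getD k 0 ≤ pvNrows n ws := by
    intro k hk
    rw [hLgetN k hk]
    split_ifs <;> omega
  have hcols : (PySem.List.pyRange 0 ws 1).map (fun r => PySem.List.pyGetD co r 0)
      = co.take ws.toNat := by
    apply List.ext_getElem
    · rw [List.length_map, PySem.List.length_pyRange_one, List.length_take]
      omega
    · intro k hk1 hk2
      have hkws : k < ws.toNat := by
        rw [List.length_map, PySem.List.length_pyRange_one] at hk1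
        omega
      have hkco : k < co.length := by omega
      rw [List.getElem_map, PySem.List.getElem_pyRange_one _ _ _
            (by rw [PySem.List.length_pyRange_one]; omega),
          List.getElem_take,
          show (0 : Int) + (k : Int) = ((k : Nat) : Int) from by omega,
          PySem.List.pyGetD_natCast, List.getD_eq_getElem co 0 hkco]
  have hfoldB : pvStB n ws co
      = (co.take ws.toNat).foldl (pvFillB (pvLB n ws)) (List.replicate ws.toNat 0, 0) := by
    unfold pvStB
    rw [← hcols, List.foldl_map]
  have hinW : ∀ c ∈ co.take ws.toNat, 0 ≤ c ∧ c < ((ws.toNat : Nat) : Int) := by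
    intro c hc
    have := hin c hc
    omega
  have hcovlen : (co.take ws.toNat).length = ws.toNat := by
    rw [List.length_take]; omega
  have hcov := pv_cover ws.toNat (co.take ws.toNat) hnd hcovlen hinW
  have hSTlen : (pvStB n ws co).1.length = ws.toNat := by
    rw [hfoldB, pv_stB_len _ _ _ _ (fun c h => (hin c h).1), List.length_replicate]
  -- express B's pairs as the per-column flatMap
  have hstepeq : ∀ (s : List (Int × Int) × Int) (c : Int), c ∈ co.take ws.toNat →
      pvColStep n ws s c = pvPairStep (pvLB n ws) ws s c := by
    intro s c hc
    obtain ⟨h0, hw⟩ := hin c hc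
    unfold pvColStep pvPairStep
    rw [hLget c h0 hw]
  have hP : (pvSt n ws co).1
      = (co.take ws.toNat).flatMap (fun c =>
          (PySem.List.pyRange 0 ((pvLB n ws).getD c.toNat 0) 1).map
            (fun row => (row * ws + c, (pvStB n ws co).1.getD c.toNat 0 + row))) := by
    have hfoldP : (pvSt n ws co).1
        = ((co.take ws.toNat).foldl (pvColStep n ws) ([], 0)).1 := by
      unfold pvSt
      rw [← hcols, List.foldl_map]
    rw [hfoldP, PySem.List.foldl_congr_mem _ _ (pvPairStep (pvLB n ws) ws) _ hstepeq,
        pv_pairsFold (pvLB n ws) ws.toNat ws hLlen hLpos (co.take ws.toNat) 0 []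
          (List.replicate ws.toNat 0) List.length_replicate hnd hinW,
        List.nil_append, ← hfoldB]
  -- getD/pyGetD bridges used in both membership directions
  have hgL : ∀ c : Int, 0 ≤ c → c < ws →
      PySem.List.pyGetD (pvLB n ws) c 0 = (pvLB n ws).getD c.toNat 0 := by
    intro c h0 hw
    rw [PySem.List.pyGetD_eq_getElem _ 0 h0 (by rw [hLlen]; omega),
        List.getD_eq_getElem _ 0 (by omega)]
  have hgS : ∀ c : Int, 0 ≤ c → c < ws →
      PySem.List.pyGetD (pvStB n ws co).1 c 0 = (pvStB n ws co).1.getD c.toNat 0 := by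
    intro c h0 hw
    rw [PySem.List.pyGetD_eq_getElem _ 0 h0 (by rw [hSTlen]; omega),
        List.getD_eq_getElem _ 0 (by omega)]
  -- the sorted pairs are exactly the scatter target
  have hTpw := pv_T_pairwise (pvLB n ws) (pvStB n ws co).1 ws (pvNrows n ws) h1
  have hTnd : (pvT (pvLB n ws) (pvStB n ws co).1 ws (pvNrows n ws)).Nodup :=
    hTpw.imp (fun h he => by rw [he] at h; exact lt_irrefl _ h)
  have hPnd : ((co.take ws.toNat).flatMap (fun c =>
      (PySem.List.pyRange 0 ((pvLB n ws).getD c.toNat 0) 1).map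
        (fun row => (row * ws + c, (pvStB n ws co).1.getD c.toNat 0 + row)))).Nodup :=
    pv_P_nodup ws (pvLB n ws) (pvStB n ws co).1 (co.take ws.toNat) hnd hin
  have hperm : (pvT (pvLB n ws) (pvStB n ws co).1 ws (pvNrows n ws)).Perm (pvSt n ws co).1 := by
    rw [hP]
    refine (List.perm_ext_iff_of_nodup hTnd hPnd).mpr ?_
    intro x
    constructor
    · intro hx
      unfold pvT at hx
      simp only [List.mem_flatMap, List.mem_filterMap] at hx
      obtain ⟨row, hrow, c, hc, hcx⟩ := hx
      obtain ⟨hr0, hrN⟩ := PySem.List.mem_pyRange_one.mp hrow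
      obtain ⟨hc0, hcW⟩ := PySem.List.mem_pyRange_one.mp hc
      rw [hgL c hc0 hcW, hgS c hc0 hcW] at hcx
      split at hcx
      case isTrue hlt =>
        cases hcx
        simp only [List.mem_flatMap, List.mem_map]
        refine ⟨c, ?_, row, PySem.List.mem_pyRange_one.mpr ⟨hr0, hlt⟩, rfl⟩
        have := hcov c.toNat (by omega)
        rwa [show ((c.toNat : Nat) : Int) = c from by omega] at this
      case isFalse => cases hcx
    · intro hx
      simp only [List.mem_flatMap, List.mem_map] at hx
      obtain ⟨c, hc, row, hrow, rfl⟩ := hx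
      obtain ⟨hc0, hcw⟩ := hin c hc
      obtain ⟨hr0, hrL⟩ := PySem.List.mem_pyRange_one.mp hrow
      unfold pvT
      simp only [List.mem_flatMap, List.mem_filterMap]
      refine ⟨row, PySem.List.mem_pyRange_one.mpr
          ⟨hr0, lt_of_lt_of_le hrL (hLle c.toNat (by omega))⟩,
        c, PySem.List.mem_pyRange_one.mpr ⟨hc0, hcw⟩, ?_⟩
      rw [hgL c hc0 hcw, hgS c hc0 hcw, if_pos hrL]
  rw [PySem.List.sorted_eq_of_perm_of_pairwise_lt ((pvSt n ws co).1)
      (pvT (pvLB n ws) (pvStB n ws co).1 ws (pvNrows n ws)) (fun p => p.1) hperm hTpw]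
  -- dropping the destinations gives the row-major read
  unfold pvT pvReadB
  rw [List.map_flatMap]
  refine List.flatMap_congr ?_
  intro row _
  rw [List.map_filterMap]
  congr 1
  funext c
  by_cases h : row < PySem.List.pyGetD (pvLB n ws) c 0 <;> simp [h]

-- ===== VERDICT (by name: the statement is the Claim_ definition above) =====
theorem apply_columnar_spec : Claim_equal_apply_columnar := by
  intro ct ws co _ hpre
  show apply_columnar ct ws co = apply_columnar_alt ct ws co
  have hn : 0 ≤ PySem.Str.len ct := by
    unfold PySem.Str.len
    positivity
  have hA : apply_columnar ct ws co
      = pvReadA (pvStA (PySem.Str.len ct) ws co).2 ws (pvNrows (PySem.Str.len ct) ws) := rfl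
  have hB : apply_columnar_alt ct ws co
      = (PySem.List.sorted (pvSt (PySem.Str.len ct) ws co).1 (fun p => p.1)).map
          (fun p => p.2) := rfl
  rcases hpre with hneg | ⟨h1, h2, hnd, hin⟩
  · rw [hA, hB, pv_negA (PySem.Str.len ct) ws co hn hneg,
      pv_negB (PySem.Str.len ct) ws co hneg]
  · rw [hA, hB, pv_mainB (PySem.Str.len ct) ws co hn h1 h2 hnd hin]
    exact pv_main (PySem.Str.len ct) ws co hn h1 h2 hnd hin
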